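-- pv_equiv track=rewrite | github.com/Skyler-Cobb/CodeTranslator | helpers/codec/tokenizer.py | _recursive_decode
-- ===== SOURCE A (Python) =====
-- from typing import Any, List, Dict
--
-- _MAX_PATHS = 10000
--
-- def _recursive_decode(
--     word: str,
--     mapping: Dict[str, List[str]],
--     flawed: bool,
--     memo: Dict[str, List[str]] | None = None
-- ) -> List[str]:
--     """
--     Recursively split `word` into tokens that match mapping keys, then
--     produce all possible plaintext strings for that word. If flawed=True,
--     allow single-character fallback when no key matches.
--     Early exit if more than _MAX_PATHS results accumulate.
--     """
--     if memo is None: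
--         memo = {}
--
--     if word == "":
--         return [""]
--
--     if word in memo:
--         return memo[word]
--
--     results: List[str] = []
--     matched = False
--
--     # Try every mapping key that matches the start of `word`
--     for tok in mapping.keys():
--         if word.startswith(tok):
--             matched = True
--             suffix = word[len(tok):]
--             for plaintext_fragment in mapping[tok]:
--                 for tail in _recursive_decode(suffix, mapping, flawed, memo):
--                     results.append(plaintext_fragment + tail)
--                     if len(results) > _MAX_PATHS:
--                         memo[word] = results
--                         return results
--
--     # If nothing matched and flawed=True, drop first character literally
--     if not matched and flawed:
--         first_char = word[0]
--         suffix = word[1:]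
--         for tail in _recursive_decode(suffix, mapping, flawed, memo):
--             results.append(first_char + tail)
--             if len(results) > _MAX_PATHS:
--                 memo[word] = results
--                 return results
--
--     memo[word] = results
--     return results
-- ===== SOURCE B (Python) =====
-- # B: iterative two-pass dynamic program, no recursion: pass 1 walks positions
-- # left-to-right marking which suffix positions are reachable by token splits;
-- # pass 2 fills dp[i] (all decodings of word[i:]) right-to-left over the
-- # reachable positions only, with islice truncation at _MAX_PATHS.
-- # Like A, B mutates `memo` in place (fills it with computed suffix results).
-- from itertools import islice
-- from typing import List, Dict
--
-- _MAX_PATHS = 10000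
--
-- def _recursive_decode(
--     word: str,
--     mapping: Dict[str, List[str]],
--     flawed: bool,
--     memo: Dict[str, List[str]] | None = None
-- ) -> List[str]:
--     if memo is None:
--         memo = {}
--     if word == "":
--         return [""]
--     if word in memo:
--         return memo[word]
--     n = len(word)
--     # pass 1: which positions can a split starting at 0 ever reach?
--     reach = [False] * (n + 1)
--     reach[0] = True
--     for i in range(n):
--         if not reach[i]:
--             continue
--         s = word[i:]
--         if s in memo:
--             continue
--         matched = False
--         for tok, frags in mapping.items():
--             if s.startswith(tok):
--                 matched = True
--                 if frags:
--                     reach[i + len(tok)] = True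
--         if not matched and flawed:
--             reach[i + 1] = True
--     # pass 2: dp over reachable positions, right to left
--     dp = {n: [""]}
--     for i in range(n - 1, -1, -1):
--         if not reach[i]:
--             continue
--         s = word[i:]
--         if s in memo:
--             dp[i] = memo[s]
--             continue
--         results: List[str] = []
--         matched = False
--         for tok, frags in mapping.items():
--             if s.startswith(tok):
--                 matched = True
--                 if frags:
--                     tails = dp[i + len(tok)]
--                     room = _MAX_PATHS + 1 - len(results)
--                     results.extend(islice((f + t for f in frags for t in tails), room))
--                     if len(results) > _MAX_PATHS:
--                         break
--         if not matched and flawed: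
--             tails = dp[i + 1]
--             results.extend(islice((s[0] + t for t in tails), _MAX_PATHS + 1 - len(results)))
--         dp[i] = results
--         memo[s] = results
--     return dp[0]
-- ===== Notes on version B (the rewrite author's own statement) =====
-- stated objective: alternative
-- what changed: A's top-down memoized recursion is replaced by an iterative two-pass dynamic program: a forward pass marks which suffix positions a token split can reach, then a backward pass fills a table dp[i] of all decodings of word[i:] over the reachable positions only (consulting memo per suffix), with islice-based truncation at _MAX_PATHS instead of a per-append length check; no recursion at all.
import Mathlib
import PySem

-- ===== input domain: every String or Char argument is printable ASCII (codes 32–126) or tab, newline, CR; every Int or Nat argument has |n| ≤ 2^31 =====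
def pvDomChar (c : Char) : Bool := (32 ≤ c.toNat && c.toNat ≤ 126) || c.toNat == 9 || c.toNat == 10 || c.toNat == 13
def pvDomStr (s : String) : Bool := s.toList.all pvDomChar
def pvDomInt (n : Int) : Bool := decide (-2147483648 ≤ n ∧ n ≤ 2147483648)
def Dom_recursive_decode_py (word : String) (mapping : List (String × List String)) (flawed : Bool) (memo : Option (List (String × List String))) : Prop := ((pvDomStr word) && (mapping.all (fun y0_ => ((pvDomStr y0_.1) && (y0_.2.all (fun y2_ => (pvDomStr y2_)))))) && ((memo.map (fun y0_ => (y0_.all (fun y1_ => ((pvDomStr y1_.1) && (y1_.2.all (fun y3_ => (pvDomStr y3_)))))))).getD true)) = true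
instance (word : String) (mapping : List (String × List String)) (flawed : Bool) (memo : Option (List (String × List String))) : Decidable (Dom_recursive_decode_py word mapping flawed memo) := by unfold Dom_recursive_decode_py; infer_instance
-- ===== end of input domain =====

-- B replaces A's top-down memoized recursion by an iterative two-pass dynamic program: a
-- forward pass marks the suffix positions reachable by token splits, then a backward pass
-- fills dp[i] (decodings of word[i:]) over the reachable positions, with islice truncation;
-- same return value. A mutates `memo` in place (so does B, writing the computed suffixes);
-- the equivalence proved here is about the RETURN value only.

-- ===== PORT A =====
-- The port works on word.toList (PySem.Chars primitives are exact on the stated ASCII domain;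
-- word[len(tok):] is List.drop, exact since slices clamp); the Python dicts `mapping` and
-- `memo` are marshalled to PySem.Dict with List Char keys (String.toList is injective, so
-- dict behaviour is preserved exactly).

abbrev pvMemo := PySem.Dict (List Char) (List String)
abbrev pvItems := List (List Char × List String)

def pvBuildDict (l : List (String × List String)) : pvMemo :=
  l.foldl (fun d kv => d.insert kv.1.toList kv.2) PySem.Dict.empty

def pvBuildMemo (memo : Option (List (String × List String))) : pvMemo :=
  match memo with
  | none => PySem.Dict.empty          -- memo = {}
  | some l => pvBuildDict l

-- A's innermost loop: `for tail in …: results.append(frag+tail); if len(results) > _MAX_PATHS: return results`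
def pvTailLoop (frag : String) : List String → List String → Except (List String) (List String)
  | res, [] => .ok res
  | res, t :: ts =>
    let res' := res ++ [frag ++ t]
    if 10000 < res'.length then .error res' else pvTailLoop frag res' ts

-- `for plaintext_fragment in mapping[tok]:` — A makes the recursive call once per fragment
def pvFragLoopA (dec : List Char → pvMemo → List String × pvMemo) (suffix : List Char) :
    List String → List String → pvMemo → Except (List String × pvMemo) (List String × pvMemo)
  | [], res, m => .ok (res, m)
  | f :: fs, res, m =>
    let tm := dec suffix m
    match pvTailLoop f res tm.1 with
    | .error r => .error (r, tm.2)
    | .ok r => pvFragLoopA dec suffix fs r tm.2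

-- `for tok in mapping.keys(): if word.startswith(tok): …`
def pvItemLoopA (dec : List Char → pvMemo → List String × pvMemo) (word : List Char) :
    pvItems → Bool → List String → pvMemo → Except (List String × pvMemo) (Bool × List String × pvMemo)
  | [], matched, res, m => .ok (matched, res, m)
  | (tok, frags) :: rest, matched, res, m =>
    if PySem.Chars.startswith word tok then
      match pvFragLoopA dec (word.drop tok.length) frags res m with
      | .error e => .error e
      | .ok (r, m') => pvItemLoopA dec word rest true r m'
    else pvItemLoopA dec word rest matched res m

def pvDecodeA (d : pvMemo) (flawed : Bool) : Nat → List Char → pvMemo → List String × pvMemo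
  | 0, _, m => ([], m)        -- fuel guard only (totality); fuel = |word|+1 suffices under Pre_
  | fuel+1, word, m =>
    if word = [] then ([""], m)
    else
      match m.get? word with                     -- `if word in memo: return memo[word]`
      | some v => (v, m)
      | none =>
        match pvItemLoopA (fun w mm => pvDecodeA d flawed fuel w mm) word d.items false [] m with
        | .error (r, m') => (r, m'.insert word r)            -- early return, after memo[word] = results
        | .ok (matched, r, m') =>
          if !matched && flawed then
            let tm := pvDecodeA d flawed fuel (word.drop 1) m'
            match pvTailLoop (String.ofList (word.take 1)) r tm.1 with    -- first_char = word[0]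
            | .error r' => (r', tm.2.insert word r')
            | .ok r' => (r', tm.2.insert word r')
          else (r, m'.insert word r)

def recursive_decode_py (word : String) (mapping : List (String × List String)) (flawed : Bool) (memo : Option (List (String × List String))) : List String :=
  (pvDecodeA (pvBuildDict mapping) flawed (word.toList.length + 1) word.toList (pvBuildMemo memo)).1

-- ===== PORT B =====
-- B's inner loop over mapping.items(): the dp rows for positions i+1 … n are the list `tl`
-- (tl[k] = dp[i+1+k]), so `dp[i + len(tok)]` is `tl.getD (tok.length - 1) []`.
def pvRowLoop (s : List Char) (tl : List (List String)) :
    pvItems → Bool → List String → Bool × List String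
  | [], matched, res => (matched, res)
  | (tok, frags) :: rest, matched, res =>
    if PySem.Chars.startswith s tok then
      match frags with
      | [] => pvRowLoop s tl rest true res          -- `if frags:` fails: nothing to extend
      | _ :: _ =>
        let tails := tl.getD (tok.length - 1) []
        let res' := res ++ (frags.flatMap (fun f => tails.map (fun x => f ++ x))).take (10001 - res.length)
        if 10000 < res'.length then (true, res')    -- break
        else pvRowLoop s tl rest true res'
    else pvRowLoop s tl rest matched res

-- one iteration of B's position loop: results for suffix s given the dp rows `tl` of shorter suffixes
def pvRow (it : pvItems) (flawed : Bool) (s : List Char) (tl : List (List String)) : List String :=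
  match pvRowLoop s tl it false [] with
  | (matched, res) =>
    if !matched && flawed then
      res ++ ((tl.getD 0 []).map (fun x => String.ofList (s.take 1) ++ x)).take (10001 - res.length)
    else res

-- pass 1, inner loop: `for tok, frags in mapping.items(): if s.startswith(tok): matched=True; if frags: reach[i+len(tok)]=True`
def pvMarkLoop (s : List Char) (i : Nat) : pvItems → Bool → List Bool → Bool × List Bool
  | [], matched, reach => (matched, reach)
  | (tok, frags) :: rest, matched, reach =>
    if PySem.Chars.startswith s tok then
      match frags with
      | [] => pvMarkLoop s i rest true reach
      | _ :: _ => pvMarkLoop s i rest true (reach.set (i + tok.length) true)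
    else pvMarkLoop s i rest matched reach

-- pass 1, one position: skip if unreachable or memoised, else mark successors (+ flawed fallback)
def pvMark1 (it : pvItems) (flawed : Bool) (memo0 : pvMemo) (w : List Char) (reach : List Bool) (i : Nat) : List Bool :=
  if reach.getD i false = false then reach
  else if (memo0.get? (w.drop i)).isSome then reach
  else
    match pvMarkLoop (w.drop i) i it false reach with
    | (matched, reach') => if !matched && flawed then reach'.set (i + 1) true else reach'

-- pass 1: reach = [False]*(n+1); reach[0] = True; for i in range(n): …
def pvReach (it : pvItems) (flawed : Bool) (memo0 : pvMemo) (w : List Char) : List Bool :=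
  (List.range w.length).foldl (pvMark1 it flawed memo0 w) ((List.replicate (w.length + 1) false).set 0 true)

-- pass 2, right-to-left over the suffix structure: row list [dp_i, …, dp_n]; unreachable rows
-- are skipped in Python (never read there), the port keeps a [] placeholder for them
def pvDpR (it : pvItems) (flawed : Bool) (memo0 : pvMemo) (reach : List Bool) (n : Nat) : List Char → List (List String)
  | [] => [[""]]                                    -- dp = {n: [""]}
  | c :: rest =>
    let tl := pvDpR it flawed memo0 reach n rest
    (if reach.getD (n - (rest.length + 1)) false then
       match memo0.get? (c :: rest) with            -- `if s in memo: dp[i] = memo[s]`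
       | some v => v
       | none => pvRow it flawed (c :: rest) tl
     else []) :: tl

def recursive_decode_py_alt (word : String) (mapping : List (String × List String)) (flawed : Bool) (memo : Option (List (String × List String))) : List String :=
  let memo0 := pvBuildMemo memo
  match word.toList with
  | [] => [""]
  | c :: rest =>
    match memo0.get? (c :: rest) with
    | some v => v
    | none =>
      let it := (pvBuildDict mapping).items
      (pvDpR it flawed memo0 (pvReach it flawed memo0 (c :: rest)) (rest.length + 1) (c :: rest)).headD []   -- dp[0]

-- ===== PRECONDITION & SPEC =====
-- Pre_ excludes mappings holding an empty-string key with a non-empty replacement list, except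
-- when the word is "" or already memoised: on the excluded inputs A recurses on the unchanged
-- word forever (RecursionError) and B reads the dp row of the position being filled (KeyError),
-- so neither program returns there.
def Pre_recursive_decode_py (word : String) (mapping : List (String × List String)) (flawed : Bool) (memo : Option (List (String × List String))) : Prop :=
  (∀ p ∈ mapping, p.1 ≠ "" ∨ p.2 = []) ∨ word = "" ∨ (∃ p ∈ memo.getD [], p.1 = word)
instance (word : String) (mapping : List (String × List String)) (flawed : Bool) (memo : Option (List (String × List String))) : Decidable (Pre_recursive_decode_py word mapping flawed memo) := by unfold Pre_recursive_decode_py; infer_instance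

def pvWitness_recursive_decode_py : String × (List (String × List String)) × Bool × (Option (List (String × List String))) :=
  ("ab", [("a", ["x"]), ("b", ["y", "z"])], true, none)

def Spec_recursive_decode_py (word : String) (mapping : List (String × List String)) (flawed : Bool) (memo : Option (List (String × List String))) (out : List String) : Prop := out = recursive_decode_py_alt word mapping flawed memo
instance (word : String) (mapping : List (String × List String)) (flawed : Bool) (memo : Option (List (String × List String))) (out : List String) : Decidable (Spec_recursive_decode_py word mapping flawed memo out) := by unfold Spec_recursive_decode_py; infer_instance

-- ===== CLAIM (what is proved, stated in full; the proofs are below) =====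
def Claim_equal_recursive_decode_py : Prop := ∀ (word : String) (mapping : List (String × List String)) (flawed : Bool) (memo : Option (List (String × List String))), Dom_recursive_decode_py word mapping flawed memo → Pre_recursive_decode_py word mapping flawed memo → Spec_recursive_decode_py word mapping flawed memo (recursive_decode_py word mapping flawed memo)

-- ===== LEMMAS AND PROOFS =====

-- the FULL dp table (every suffix, reachable or not) — a proof device only
def pvDp (it : pvItems) (flawed : Bool) (memo0 : pvMemo) : List Char → List (List String)
  | [] => [[""]]
  | c :: rest =>
    let tl := pvDp it flawed memo0 rest
    (match memo0.get? (c :: rest) with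
     | some v => v
     | none => pvRow it flawed (c :: rest) tl) :: tl

-- the canonical value of a suffix: the head of its full dp table
def pvV (it : pvItems) (flawed : Bool) (memo0 : pvMemo) (s : List Char) : List String :=
  (pvDp it flawed memo0 s).headD []

-- invariant on A's memo: every entry holds the canonical value, and memo0's keys stay present
def pvInv (it : pvItems) (flawed : Bool) (memo0 : pvMemo) (m : pvMemo) : Prop :=
  (∀ s v, s ≠ [] → m.get? s = some v → v = pvV it flawed memo0 s) ∧
  (∀ s v, memo0.get? s = some v → (m.get? s).isSome)

theorem pv_startswith_length {s tok : List Char} (h : PySem.Chars.startswith s tok = true) :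
    tok.length ≤ s.length := by
  rcases (PySem.Chars.startswith_iff _ _).1 h with ⟨u, hu⟩
  subst hu; simp

-- element k of the dp table of s is the canonical value of s.drop k
theorem pvDp_getD (it : pvItems) (flawed : Bool) (memo0 : pvMemo) :
    ∀ (s : List Char) (k : Nat), k ≤ s.length →
      (pvDp it flawed memo0 s).getD k [] = pvV it flawed memo0 (s.drop k) := by
  intro s
  induction s with
  | nil =>
    intro k hk
    have hk0 : k = 0 := by simpa using hk
    subst hk0
    simp [pvDp, pvV]
  | cons c rest ih =>
    intro k hk
    cases k with
    | zero => simp [pvDp, pvV]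
    | succ k' =>
      have : (pvDp it flawed memo0 (c :: rest)).getD (k' + 1) []
          = (pvDp it flawed memo0 rest).getD k' [] := by
        simp [pvDp]
      rw [this, ih k' (by simpa using hk)]
      rfl

-- closed form of A's innermost append-and-check loop
theorem pvTailLoop_eq (frag : String) (t : List String) : ∀ res : List String, res.length ≤ 10000 →
    pvTailLoop frag res t =
      if res.length + t.length ≤ 10000 then .ok (res ++ t.map (fun x => frag ++ x))
      else .error ((res ++ t.map (fun x => frag ++ x)).take 10001) := by
  induction t with
  | nil =>
    intro res h
    simp only [pvTailLoop, List.map_nil, List.append_nil, List.length_nil, Nat.add_zero]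
    rw [if_pos h]
  | cons x xs ih =>
    intro res h
    simp only [pvTailLoop, List.map_cons]
    by_cases hc : res.length = 10000
    · rw [if_pos (by simp [hc]), if_neg (by simp; omega)]
      congr 1
      rw [show res ++ (frag ++ x) :: xs.map (fun x => frag ++ x)
            = (res ++ [frag ++ x]) ++ xs.map (fun x => frag ++ x) by simp]
      rw [show (10001 : Nat) = (res ++ [frag ++ x]).length by simp [hc]]
      exact List.take_left.symm
    · have h1 : res.length < 10000 := lt_of_le_of_ne h hc
      rw [if_neg (by simp; omega)]
      rw [ih (res ++ [frag ++ x]) (by simp; omega)]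
      have hl : res ++ [frag ++ x] ++ xs.map (fun x => frag ++ x)
          = res ++ (frag ++ x) :: xs.map (fun x => frag ++ x) := by simp
      by_cases hx : res.length + (x :: xs).length ≤ 10000
      · rw [if_pos (show (res ++ [frag ++ x]).length + xs.length ≤ 10000 by
            simp at hx ⊢; omega), if_pos hx, hl]
      · rw [if_neg (show ¬ (res ++ [frag ++ x]).length + xs.length ≤ 10000 by
            simp at hx ⊢; omega), if_neg hx, hl]

-- once computed, re-decoding the same suffix is a no-op (A's memoisation)
theorem pvDecodeA_stable (d : pvMemo) (flawed : Bool) :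
    ∀ (fuel : Nat) (w : List Char) (m : pvMemo) (r : List String) (m₂ : pvMemo),
      pvDecodeA d flawed fuel w m = (r, m₂) → pvDecodeA d flawed fuel w m₂ = (r, m₂) := by
  intro fuel w m r m₂ hA
  cases fuel with
  | zero =>
    simp only [pvDecodeA] at hA ⊢
    injection hA with h1 h2
    subst h1; subst h2
    rfl
  | succ n =>
    by_cases hw : w = []
    · subst hw
      simp only [pvDecodeA] at hA ⊢
      injection hA with h1 h2
      subst h1; subst h2
      rfl
    · cases hget : m.get? w with
      | some v =>
        simp only [pvDecodeA, if_neg hw, hget] at hA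
        injection hA with h1 h2
        subst h1; subst h2
        simp only [pvDecodeA, if_neg hw, hget]
      | none =>
        have h2 : m₂.get? w = some r := by
          simp only [pvDecodeA, if_neg hw, hget] at hA
          split at hA
          · injection hA with h1 h2
            subst h1; subst h2
            exact PySem.Dict.get?_insert_self _ _ _
          · split at hA
            · split at hA <;>
                · injection hA with h1 h2
                  subst h1; subst h2
                  exact PySem.Dict.get?_insert_self _ _ _
            · injection hA with h1 h2
              subst h1; subst h2
              exact PySem.Dict.get?_insert_self _ _ _
        simp only [pvDecodeA, if_neg hw, h2]

theorem pv_take_append (res l : List String) (h : res.length ≤ 10000) :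
    (res ++ l).take 10001 = res ++ l.take (10001 - res.length) := by
  rw [List.take_append, List.take_of_length_le (by omega)]

-- closed form of A's fragment loop (non-empty fragment list), using stability of dec
theorem pvFragLoopA_eq (dec : List Char → pvMemo → List String × pvMemo) (suffix : List Char)
    (t : List String) (m' : pvMemo) (h2 : dec suffix m' = (t, m')) :
    ∀ (fs : List String) (f : String) (res : List String) (M : pvMemo),
      dec suffix M = (t, m') → res.length ≤ 10000 →
      pvFragLoopA dec suffix (f :: fs) res M =
        (if 10000 < (res ++ ((f :: fs).flatMap (fun g => t.map (fun x => g ++ x))).take (10001 - res.length)).length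
         then .error (res ++ ((f :: fs).flatMap (fun g => t.map (fun x => g ++ x))).take (10001 - res.length), m')
         else .ok (res ++ ((f :: fs).flatMap (fun g => t.map (fun x => g ++ x))).take (10001 - res.length), m')) := by
  intro fs
  induction fs with
  | nil =>
    intro f res M hM hres
    simp only [pvFragLoopA, hM]
    rw [pvTailLoop_eq f t res hres]
    simp only [List.flatMap_cons, List.flatMap_nil, List.append_nil]
    by_cases hcap : res.length + t.length ≤ 10000
    · rw [if_pos hcap]
      rw [List.take_of_length_le (by simp; omega)]
      rw [if_neg (by simp; omega)]
    · rw [if_neg hcap, pv_take_append res _ hres]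
      rw [if_pos (by simp [List.length_take]; omega)]
  | cons f' fs ih =>
    intro f res M hM hres
    have step : pvFragLoopA dec suffix (f :: f' :: fs) res M =
        match pvTailLoop f res (dec suffix M).1 with
        | .error r => .error (r, (dec suffix M).2)
        | .ok r => pvFragLoopA dec suffix (f' :: fs) r (dec suffix M).2 := rfl
    rw [step, hM]
    rw [pvTailLoop_eq f t res hres]
    by_cases hcap : res.length + t.length ≤ 10000
    · rw [if_pos hcap]
      show pvFragLoopA dec suffix (f' :: fs) (res ++ t.map fun x => f ++ x) m' = _
      rw [ih f' (res ++ t.map fun x => f ++ x) m' h2 (by simp; omega)]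
      have hmapf : (t.map fun x => f ++ x).take (10001 - res.length) = t.map fun x => f ++ x :=
        List.take_of_length_le (by simp; omega)
      have hlist : (res ++ t.map fun x => f ++ x) ++
            ((f' :: fs).flatMap (fun g => t.map fun x => g ++ x)).take
              (10001 - (res ++ t.map fun x => f ++ x).length)
          = res ++ ((f :: f' :: fs).flatMap (fun g => t.map fun x => g ++ x)).take
              (10001 - res.length) := by
        conv_rhs => rw [List.flatMap_cons, List.take_append, hmapf]
        simp [List.append_assoc, Nat.sub_sub]
      simp only [hlist]
    · rw [if_neg hcap]
      show Except.error ((res ++ t.map fun x => f ++ x).take 10001, m') = _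
      rw [pv_take_append res _ hres]
      have hlist : ((f :: f' :: fs).flatMap (fun g => t.map fun x => g ++ x)).take (10001 - res.length)
          = (t.map fun x => f ++ x).take (10001 - res.length) := by
        rw [List.flatMap_cons, List.take_append,
            show 10001 - res.length - (t.map fun x => f ++ x).length = 0 by simp; omega,
            List.take_zero, List.append_nil]
      simp only [hlist]
      rw [if_pos (by simp [List.length_take]; omega)]

-- inserting the canonical value preserves the memo invariant
theorem pvInv_insert (it : pvItems) (flawed : Bool) (memo0 : pvMemo) (m : pvMemo)
    (w : List Char) (r : List String) (hI : pvInv it flawed memo0 m)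
    (hr : r = pvV it flawed memo0 w) : pvInv it flawed memo0 (m.insert w r) := by
  constructor
  · intro s v hs hv
    by_cases hsw : s = w
    · subst hsw
      rw [PySem.Dict.get?_insert_self] at hv
      injection hv with h
      rw [← h, hr]
    · rw [PySem.Dict.get?_insert_of_ne _ _ hsw] at hv
      exact hI.1 s v hs hv
  · intro s v hv
    by_cases hsw : s = w
    · subst hsw
      rw [PySem.Dict.get?_insert_self]
      rfl
    · rw [PySem.Dict.get?_insert_of_ne _ _ hsw]
      exact hI.2 s v hv

-- A's key loop with memoized recursion computes exactly B's row loop, preserving the invariant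
theorem pvLoopA_eq (d : pvMemo) (flawed : Bool) (memo0 : pvMemo) (n : Nat) (c : Char) (rest : List Char)
    (hrest : rest.length < n)
    (hIH : ∀ (w : List Char) (m : pvMemo), w.length < n → pvInv d.items flawed memo0 m →
      (pvDecodeA d flawed n w m).1 = pvV d.items flawed memo0 w ∧
        pvInv d.items flawed memo0 (pvDecodeA d flawed n w m).2) :
    ∀ (l : pvItems), (∀ p ∈ l, p.1 ≠ ([] : List Char) ∨ p.2 = ([] : List String)) →
    ∀ (matched : Bool) (res : List String) (m : pvMemo),
      pvInv d.items flawed memo0 m → res.length ≤ 10000 →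
      ∃ m', pvInv d.items flawed memo0 m' ∧
        ((10000 < (pvRowLoop (c :: rest) (pvDp d.items flawed memo0 rest) l matched res).2.length ∧
          (pvRowLoop (c :: rest) (pvDp d.items flawed memo0 rest) l matched res).1 = true ∧
          pvItemLoopA (fun w mm => pvDecodeA d flawed n w mm) (c :: rest) l matched res m =
            .error ((pvRowLoop (c :: rest) (pvDp d.items flawed memo0 rest) l matched res).2, m')) ∨
         ((pvRowLoop (c :: rest) (pvDp d.items flawed memo0 rest) l matched res).2.length ≤ 10000 ∧
          pvItemLoopA (fun w mm => pvDecodeA d flawed n w mm) (c :: rest) l matched res m =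
            .ok ((pvRowLoop (c :: rest) (pvDp d.items flawed memo0 rest) l matched res).1,
                 (pvRowLoop (c :: rest) (pvDp d.items flawed memo0 rest) l matched res).2, m'))) := by
  intro l
  induction l with
  | nil =>
    intro _ matched res m hI hres
    refine ⟨m, hI, Or.inr ⟨?_, ?_⟩⟩
    · simpa [pvRowLoop] using hres
    · simp [pvRowLoop, pvItemLoopA]
  | cons p l ih =>
    intro hk matched res m hI hres
    obtain ⟨tok, frags⟩ := p
    by_cases hs : PySem.Chars.startswith (c :: rest) tok
    · cases frags with
      | nil =>
        -- matched := True, nothing appended, on both sides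
        have hA : pvItemLoopA (fun w mm => pvDecodeA d flawed n w mm) (c :: rest)
            ((tok, []) :: l) matched res m =
            pvItemLoopA (fun w mm => pvDecodeA d flawed n w mm) (c :: rest) l true res m := by
          simp only [pvItemLoopA, if_pos hs, pvFragLoopA]
        have hB : pvRowLoop (c :: rest) (pvDp d.items flawed memo0 rest) ((tok, []) :: l) matched res =
            pvRowLoop (c :: rest) (pvDp d.items flawed memo0 rest) l true res := by
          simp only [pvRowLoop, if_pos hs]
        rw [hA, hB]
        exact ih (fun q hq => hk q (List.mem_cons_of_mem _ hq)) true res m hI hres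
      | cons f fs =>
        have htok : tok ≠ ([] : List Char) := by
          rcases hk (tok, f :: fs) (List.mem_cons_self ..) with h | h
          · exact h
          · exact absurd h (by simp)
        have htokl : 1 ≤ tok.length := by
          cases tok with
          | nil => exact absurd rfl htok
          | cons _ _ => simp
        have hlen : tok.length ≤ rest.length + 1 := by
          have := pv_startswith_length hs
          simpa using this
        have hsufl : ((c :: rest).drop tok.length).length < n := by
          simp only [List.length_drop, List.length_cons]
          omega
        cases hdec : pvDecodeA d flawed n ((c :: rest).drop tok.length) m with
        | mk t m₁ =>
          have hspec := hIH ((c :: rest).drop tok.length) m hsufl hI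
          rw [hdec] at hspec
          obtain ⟨ht, hI₁⟩ := hspec
          have ht' : t = pvV d.items flawed memo0 ((c :: rest).drop tok.length) := ht
          have hstab : pvDecodeA d flawed n ((c :: rest).drop tok.length) m₁ = (t, m₁) :=
            pvDecodeA_stable d flawed n _ m t m₁ hdec
          -- the dp row B reads is the same canonical value
          have hdp : (pvDp d.items flawed memo0 rest).getD (tok.length - 1) [] = t := by
            rw [pvDp_getD d.items flawed memo0 rest (tok.length - 1) (by omega)]
            rw [ht']
            congr 1
            cases tok with
            | nil => exact absurd rfl htok
            | cons a as => simp
          have hA : pvItemLoopA (fun w mm => pvDecodeA d flawed n w mm) (c :: rest)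
              ((tok, f :: fs) :: l) matched res m =
              match pvFragLoopA (fun w mm => pvDecodeA d flawed n w mm) ((c :: rest).drop tok.length)
                  (f :: fs) res m with
              | .error e => .error e
              | .ok (r, m') => pvItemLoopA (fun w mm => pvDecodeA d flawed n w mm) (c :: rest) l true r m' := by
            simp only [pvItemLoopA, if_pos hs]
          rw [pvFragLoopA_eq (fun w mm => pvDecodeA d flawed n w mm) _ t m₁ hstab fs f res m hdec hres] at hA
          have hB : pvRowLoop (c :: rest) (pvDp d.items flawed memo0 rest) ((tok, f :: fs) :: l) matched res =
              (if 10000 < (res ++ ((f :: fs).flatMap (fun g => t.map (fun x => g ++ x))).take (10001 - res.length)).length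
               then (true, res ++ ((f :: fs).flatMap (fun g => t.map (fun x => g ++ x))).take (10001 - res.length))
               else pvRowLoop (c :: rest) (pvDp d.items flawed memo0 rest) l true
                 (res ++ ((f :: fs).flatMap (fun g => t.map (fun x => g ++ x))).take (10001 - res.length))) := by
            simp only [pvRowLoop, if_pos hs, hdp]
          set res' := res ++ ((f :: fs).flatMap (fun g => t.map (fun x => g ++ x))).take (10001 - res.length) with hres'
          by_cases hcap : 10000 < res'.length
          · rw [hB]
            simp only [if_pos hcap] at hA ⊢
            exact ⟨m₁, hI₁, Or.inl ⟨hcap, by simp, hA⟩⟩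
          · rw [hB]
            simp only [if_neg hcap] at hA ⊢
            have := ih (fun q hq => hk q (List.mem_cons_of_mem _ hq)) true res' m₁ hI₁ (by omega)
            rcases this with ⟨m', hI', hcase⟩
            refine ⟨m', hI', ?_⟩
            rw [hA]
            exact hcase
    · have hA : pvItemLoopA (fun w mm => pvDecodeA d flawed n w mm) (c :: rest)
          ((tok, frags) :: l) matched res m =
          pvItemLoopA (fun w mm => pvDecodeA d flawed n w mm) (c :: rest) l matched res m := by
        simp only [pvItemLoopA, if_neg hs]
      have hB : pvRowLoop (c :: rest) (pvDp d.items flawed memo0 rest) ((tok, frags) :: l) matched res =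
          pvRowLoop (c :: rest) (pvDp d.items flawed memo0 rest) l matched res := by
        simp only [pvRowLoop, if_neg hs]
      rw [hA, hB]
      exact ih (fun q hq => hk q (List.mem_cons_of_mem _ hq)) matched res m hI hres

-- main lemma: with enough fuel, A computes the canonical (bottom-up) value and keeps the invariant
theorem pvDecodeA_V (d : pvMemo) (flawed : Bool) (memo0 : pvMemo)
    (hk : ∀ p ∈ d.items, p.1 ≠ ([] : List Char) ∨ p.2 = ([] : List String)) :
    ∀ (n : Nat) (w : List Char) (m : pvMemo), w.length < n → pvInv d.items flawed memo0 m →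
      (pvDecodeA d flawed n w m).1 = pvV d.items flawed memo0 w ∧
        pvInv d.items flawed memo0 (pvDecodeA d flawed n w m).2 := by
  intro n
  induction n with
  | zero => intro w m hw; omega
  | succ n ih =>
    intro w m hw hI
    cases w with
    | nil =>
      constructor
      · simp [pvDecodeA, pvV, pvDp]
      · simpa [pvDecodeA] using hI
    | cons c rest =>
      have hwne : (c :: rest) ≠ ([] : List Char) := by simp
      cases hget : m.get? (c :: rest) with
      | some v =>
        constructor
        · simp only [pvDecodeA, if_neg hwne, hget]
          exact hI.1 (c :: rest) v hwne hget
        · simpa [pvDecodeA, if_neg hwne, hget] using hI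
      | none =>
        have hm0 : memo0.get? (c :: rest) = none := by
          cases h0 : memo0.get? (c :: rest) with
          | none => rfl
          | some v =>
            have := hI.2 (c :: rest) v h0
            rw [hget] at this
            exact absurd this (by simp)
        have hV : pvV d.items flawed memo0 (c :: rest) =
            pvRow d.items flawed (c :: rest) (pvDp d.items flawed memo0 rest) := by
          simp [pvV, pvDp, hm0]
        have hrest : rest.length < n := by simpa using hw
        have hloop := pvLoopA_eq d flawed memo0 n c rest hrest
          (fun w' m' hw' hI' => ih w' m' hw' hI') d.items hk false [] m hI (by simp)
        rcases hloop with ⟨m', hI', hcase⟩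
        rcases hcase with ⟨hcap, hmt, hA⟩ | ⟨hcap, hA⟩
        · -- break: A early-returns the truncated row, which is the canonical value
          have hrow : pvRow d.items flawed (c :: rest) (pvDp d.items flawed memo0 rest) =
              (pvRowLoop (c :: rest) (pvDp d.items flawed memo0 rest) d.items false []).2 := by
            unfold pvRow
            rw [show (pvRowLoop (c :: rest) (pvDp d.items flawed memo0 rest) d.items false []) =
              ((pvRowLoop (c :: rest) (pvDp d.items flawed memo0 rest) d.items false []).1,
               (pvRowLoop (c :: rest) (pvDp d.items flawed memo0 rest) d.items false []).2) from rfl, hmt]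
            simp
          constructor
          · simp only [pvDecodeA, if_neg hwne, hget, hA]
            rw [hV, hrow]
          · simp only [pvDecodeA, if_neg hwne, hget, hA]
            exact pvInv_insert _ _ _ _ _ _ hI' (by rw [hV, hrow])
        · -- normal exit: the flawed fallback (if any) also matches B's row
          set mt := (pvRowLoop (c :: rest) (pvDp d.items flawed memo0 rest) d.items false []).1 with hmtdef
          set r := (pvRowLoop (c :: rest) (pvDp d.items flawed memo0 rest) d.items false []).2 with hrdef
          by_cases hfb : (!mt && flawed) = true
          · -- fallback fires
            cases hdec : pvDecodeA d flawed n rest m' with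
            | mk t2 m₂ =>
              have hspec := ih rest m' hrest hI'
              rw [hdec] at hspec
              obtain ⟨ht2, hI₂⟩ := hspec
              have hdrop : (c :: rest).drop 1 = rest := by simp
              have htl : pvTailLoop (String.ofList ((c :: rest).take 1)) r t2 =
                  if r.length + t2.length ≤ 10000
                  then .ok (r ++ t2.map (fun x => String.ofList ((c :: rest).take 1) ++ x))
                  else .error ((r ++ t2.map (fun x => String.ofList ((c :: rest).take 1) ++ x)).take 10001) :=
                pvTailLoop_eq _ t2 r hcap
              have hdp0 : (pvDp d.items flawed memo0 rest).getD 0 [] = t2 := by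
                rw [pvDp_getD d.items flawed memo0 rest 0 (by omega)]
                simpa using ht2.symm
              have hrowval : pvRow d.items flawed (c :: rest) (pvDp d.items flawed memo0 rest) =
                  r ++ (t2.map (fun x => String.ofList ((c :: rest).take 1) ++ x)).take (10001 - r.length) := by
                unfold pvRow
                rw [show (pvRowLoop (c :: rest) (pvDp d.items flawed memo0 rest) d.items false []) =
                  (mt, r) from rfl]
                simp only [hfb, if_pos, hdp0]
              constructor
              · simp only [pvDecodeA, if_neg hwne, hget, hA, hfb, if_pos, hdrop, hdec, htl]
                rw [hV, hrowval]
                by_cases hc2 : r.length + t2.length ≤ 10000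
                · simp only [if_pos hc2]
                  rw [List.take_of_length_le (show (t2.map (fun x => String.ofList ((c :: rest).take 1) ++ x)).length ≤ 10001 - r.length by simp; omega)]
                · simp only [if_neg hc2]
                  rw [pv_take_append r _ hcap]
              · simp only [pvDecodeA, if_neg hwne, hget, hA, hfb, if_pos, hdrop, hdec, htl]
                by_cases hc2 : r.length + t2.length ≤ 10000
                · simp only [if_pos hc2]
                  refine pvInv_insert _ _ _ _ _ _ hI₂ ?_
                  rw [hV, hrowval, List.take_of_length_le (show (t2.map (fun x => String.ofList ((c :: rest).take 1) ++ x)).length ≤ 10001 - r.length by simp; omega)]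
                · simp only [if_neg hc2]
                  refine pvInv_insert _ _ _ _ _ _ hI₂ ?_
                  rw [hV, hrowval, pv_take_append r _ hcap]
          · -- no fallback
            have hrowval : pvRow d.items flawed (c :: rest) (pvDp d.items flawed memo0 rest) = r := by
              unfold pvRow
              rw [show (pvRowLoop (c :: rest) (pvDp d.items flawed memo0 rest) d.items false []) =
                (mt, r) from rfl]
              exact if_neg hfb
            constructor
            · simp only [pvDecodeA, if_neg hwne, hget, hA, hfb]
              simp only [Bool.not_eq_true] at hfb
              rw [if_neg (by simpa using hfb)]
              rw [hV, hrowval]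
            · simp only [pvDecodeA, if_neg hwne, hget, hA]
              rw [if_neg (by simpa [Bool.not_eq_true] using hfb)]
              exact pvInv_insert _ _ _ _ _ _ hI' (by rw [hV, hrowval])

-- every item of the marshalled dict stems from some entry of the input list
theorem pvBuildDict_pred (P : List Char × List String → Prop) :
    ∀ (l : List (String × List String)) (d : pvMemo), (∀ p ∈ d.items, P p) →
      (∀ q ∈ l, P (q.1.toList, q.2)) →
      ∀ p ∈ (l.foldl (fun d kv => d.insert kv.1.toList kv.2) d).items, P p := by
  intro l
  induction l with
  | nil => intro d hd _ p hp; exact hd p hp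
  | cons q rest ih =>
    intro d hd hq p hp
    refine ih _ ?_ (fun a ha => hq a (List.mem_cons_of_mem _ ha)) p hp
    intro p' hp'
    rcases (PySem.Dict.mem_items_insert ..).1 hp' with h1 | h2
    · subst h1
      exact hq q (List.mem_cons_self ..)
    · exact hd p' h2.1

-- a key present in the dict stays present through further inserts
theorem pvGetIsSome_foldl (k : List Char) :
    ∀ (l : List (String × List String)) (d : pvMemo), (d.get? k).isSome →
      ((l.foldl (fun d kv => d.insert kv.1.toList kv.2) d).get? k).isSome := by
  intro l
  induction l with
  | nil => intro d h; exact h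
  | cons q rest ih =>
    intro d h
    refine ih _ ?_
    by_cases hk : k = q.1.toList
    · rw [hk, PySem.Dict.get?_insert_self]; rfl
    · rw [PySem.Dict.get?_insert_of_ne _ _ hk]; exact h

-- a word listed in the initial memo is found by the marshalled dict
theorem pvBuildMemo_mem (word : String) :
    ∀ (l : List (String × List String)) (d : pvMemo), (∃ p ∈ l, p.1 = word) →
      ((l.foldl (fun d kv => d.insert kv.1.toList kv.2) d).get? word.toList).isSome := by
  intro l
  induction l with
  | nil => intro d h; exact absurd h (by simp)
  | cons q rest ih =>
    intro d h
    rcases h with ⟨p, hp, hpw⟩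
    rcases List.mem_cons.1 hp with rfl | hmem
    · simp only [List.foldl_cons]
      refine pvGetIsSome_foldl _ _ _ ?_
      rw [← hpw, PySem.Dict.get?_insert_self]; rfl
    · exact ih _ ⟨p, hmem, hpw⟩

-- the initial memo satisfies the invariant
theorem pvInv_init (it : pvItems) (flawed : Bool) (memo0 : pvMemo) :
    pvInv it flawed memo0 memo0 := by
  constructor
  · intro s v hs hv
    cases s with
    | nil => exact absurd rfl hs
    | cons c rest => simp [pvV, pvDp, hv]
  · intro s v hv
    simp [hv]


-- ===== reachability: pass 1 marks exactly what pass 2 needs =====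

theorem pvGetD_set_mono (l : List Bool) (k j : Nat) (h : l.getD j false = true) :
    (l.set k true).getD j false = true := by
  simp only [List.getD_eq_getElem?_getD, List.getElem?_set] at h ⊢
  by_cases hkj : k = j
  · subst hkj
    by_cases hkl : k < l.length
    · simp [hkl]
    · simpa [hkl] using h
  · simpa [hkj] using h


theorem pvGetD_set_ne (l : List Bool) (k j : Nat) (v : Bool) (h : j ≠ k) :
    (l.set k v).getD j false = l.getD j false := by
  have hkj : ¬ k = j := fun hh => h hh.symm
  simp [List.getD_eq_getElem?_getD, hkj]

theorem pvGetD_set_self (l : List Bool) (k : Nat) (h : k < l.length) :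
    (l.set k true).getD k false = true := by
  simp [List.getD_eq_getElem?_getD, h]

theorem pvMarkLoop_len (s : List Char) (i : Nat) :
    ∀ (l : pvItems) (m : Bool) (r : List Bool), ((pvMarkLoop s i l m r).2).length = r.length := by
  intro l
  induction l with
  | nil => intro m r; rfl
  | cons p rest ih =>
    intro m r
    obtain ⟨tok, frags⟩ := p
    simp only [pvMarkLoop]
    split
    · cases frags with
      | nil => exact ih true r
      | cons f fs => rw [ih true _]; exact List.length_set ..
    · exact ih m r

theorem pvMarkLoop_mono (s : List Char) (i j : Nat) :
    ∀ (l : pvItems) (m : Bool) (r : List Bool), r.getD j false = true →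
      ((pvMarkLoop s i l m r).2).getD j false = true := by
  intro l
  induction l with
  | nil => intro m r h; exact h
  | cons p rest ih =>
    intro m r h
    obtain ⟨tok, frags⟩ := p
    simp only [pvMarkLoop]
    split
    · cases frags with
      | nil => exact ih true r h
      | cons f fs => exact ih true _ (pvGetD_set_mono _ _ _ h)
    · exact ih m r h

theorem pvMark1_mono (it : pvItems) (flawed : Bool) (memo0 : pvMemo) (w : List Char)
    (r : List Bool) (i j : Nat) (h : r.getD j false = true) :
    (pvMark1 it flawed memo0 w r i).getD j false = true := by
  unfold pvMark1
  split
  · exact h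
  · split
    · exact h
    · cases hml : pvMarkLoop (w.drop i) i it false r with
      | mk matched r' =>
        have hr' : r'.getD j false = true := by
          have := pvMarkLoop_mono (w.drop i) i j it false r h
          rw [hml] at this
          exact this
        show (if (!matched && flawed) = true then r'.set (i + 1) true else r').getD j false = true
        split
        · exact pvGetD_set_mono _ _ _ hr'
        · exact hr'

theorem pvMarkLoop_low (s : List Char) (i j : Nat) (hj : j ≤ i) :
    ∀ (l : pvItems), (∀ p ∈ l, p.1 ≠ ([] : List Char) ∨ p.2 = ([] : List String)) →
    ∀ (m : Bool) (r : List Bool), ((pvMarkLoop s i l m r).2).getD j false = r.getD j false := by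
  intro l
  induction l with
  | nil => intro _ m r; rfl
  | cons p rest ih =>
    intro hkk m r
    obtain ⟨tok, frags⟩ := p
    simp only [pvMarkLoop]
    split
    · cases frags with
      | nil => exact ih (fun q hq => hkk q (List.mem_cons_of_mem _ hq)) true r
      | cons f fs =>
        rw [ih (fun q hq => hkk q (List.mem_cons_of_mem _ hq)) true _]
        have htok : tok ≠ ([] : List Char) := by
          rcases hkk (tok, f :: fs) (List.mem_cons_self ..) with h | h
          · exact h
          · exact absurd h (by simp)
        have h1 : 1 ≤ tok.length := by
          cases tok with
          | nil => exact absurd rfl htok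
          | cons _ _ => simp
        exact pvGetD_set_ne _ _ _ _ (by omega)
    · exact ih (fun q hq => hkk q (List.mem_cons_of_mem _ hq)) m r

theorem pvMark1_low (it : pvItems) (flawed : Bool) (memo0 : pvMemo) (w : List Char)
    (hk : ∀ p ∈ it, p.1 ≠ ([] : List Char) ∨ p.2 = ([] : List String))
    (r : List Bool) (i j : Nat) (hj : j ≤ i) :
    (pvMark1 it flawed memo0 w r i).getD j false = r.getD j false := by
  unfold pvMark1
  split
  · rfl
  · split
    · rfl
    · cases hml : pvMarkLoop (w.drop i) i it false r with
      | mk matched r' =>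
        have hr' : r'.getD j false = r.getD j false := by
          have := pvMarkLoop_low (w.drop i) i j hj it hk false r
          rw [hml] at this
          exact this
        show (if (!matched && flawed) = true then r'.set (i + 1) true else r').getD j false = r.getD j false
        split
        · rw [pvGetD_set_ne _ _ _ _ (by omega)]; exact hr'
        · exact hr'

theorem pvMarkLoop_marks (s : List Char) (i : Nat) (tok : List Char) (frags : List String)
    (hf : frags ≠ ([] : List String)) (hs : PySem.Chars.startswith s tok = true) :
    ∀ (l : pvItems), (tok, frags) ∈ l →
    ∀ (m : Bool) (r : List Bool), i + tok.length < r.length →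
      ((pvMarkLoop s i l m r).2).getD (i + tok.length) false = true := by
  intro l
  induction l with
  | nil => intro h; exact absurd h (by simp)
  | cons p rest ih =>
    intro hmem m r hlen
    rcases List.mem_cons.1 hmem with rfl | hmem'
    · simp only [pvMarkLoop, if_pos hs]
      cases frags with
      | nil => exact absurd rfl hf
      | cons f fs =>
        exact pvMarkLoop_mono s i _ rest true _
          (pvGetD_set_self r _ hlen)
    · obtain ⟨tok', frags'⟩ := p
      simp only [pvMarkLoop]
      split
      · cases frags' with
        | nil => exact ih hmem' true r hlen
        | cons f fs =>
          exact ih hmem' true _ (by rw [List.length_set]; exact hlen)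
      · exact ih hmem' m r hlen

theorem pvMarkLoop_nomatch (s : List Char) (i : Nat) :
    ∀ (l : pvItems), (∀ p ∈ l, PySem.Chars.startswith s p.1 = false) →
    ∀ (m : Bool) (r : List Bool), pvMarkLoop s i l m r = (m, r) := by
  intro l
  induction l with
  | nil => intro _ m r; rfl
  | cons p rest ih =>
    intro hno m r
    obtain ⟨tok, frags⟩ := p
    have := hno (tok, frags) (List.mem_cons_self ..)
    simp only [pvMarkLoop, this]
    simp only [Bool.false_eq_true, if_false]
    exact ih (fun q hq => hno q (List.mem_cons_of_mem _ hq)) m r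

-- the fold of pass 1 up to step m
def pvH (it : pvItems) (flawed : Bool) (memo0 : pvMemo) (w : List Char) (m : Nat) : List Bool :=
  (List.range m).foldl (pvMark1 it flawed memo0 w) ((List.replicate (w.length + 1) false).set 0 true)

theorem pvH_succ (it : pvItems) (flawed : Bool) (memo0 : pvMemo) (w : List Char) (m : Nat) :
    pvH it flawed memo0 w (m + 1) = pvMark1 it flawed memo0 w (pvH it flawed memo0 w m) m := by
  unfold pvH
  rw [List.range_succ, List.foldl_append]
  rfl

theorem pvReach_eq_H (it : pvItems) (flawed : Bool) (memo0 : pvMemo) (w : List Char) :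
    pvReach it flawed memo0 w = pvH it flawed memo0 w w.length := rfl

theorem pvMark1_len (it : pvItems) (flawed : Bool) (memo0 : pvMemo) (w : List Char)
    (r : List Bool) (i : Nat) : (pvMark1 it flawed memo0 w r i).length = r.length := by
  unfold pvMark1
  split
  · rfl
  · split
    · rfl
    · cases hml : pvMarkLoop (w.drop i) i it false r with
      | mk matched r' =>
        have hr' : r'.length = r.length := by
          have := pvMarkLoop_len (w.drop i) i it false r
          rw [hml] at this
          exact this
        show (if (!matched && flawed) = true then r'.set (i + 1) true else r').length = r.length
        split
        · rw [List.length_set]; exact hr'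
        · exact hr'

theorem pvH_len (it : pvItems) (flawed : Bool) (memo0 : pvMemo) (w : List Char) :
    ∀ m, (pvH it flawed memo0 w m).length = w.length + 1 := by
  intro m
  induction m with
  | zero => simp [pvH]
  | succ m ih => rw [pvH_succ, pvMark1_len]; exact ih

theorem pvH_mono (it : pvItems) (flawed : Bool) (memo0 : pvMemo) (w : List Char) (j : Nat) :
    ∀ (m m' : Nat), m ≤ m' → (pvH it flawed memo0 w m).getD j false = true →
      (pvH it flawed memo0 w m').getD j false = true := by
  intro m m' hle
  induction m' with
  | zero =>
    intro h
    have : m = 0 := by omega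
    subst this
    exact h
  | succ k ih =>
    intro h
    by_cases hmk : m = k + 1
    · subst hmk; exact h
    · rw [pvH_succ]
      exact pvMark1_mono _ _ _ _ _ _ _ (ih (by omega) h)

theorem pvH_zero_true (it : pvItems) (flawed : Bool) (memo0 : pvMemo) (w : List Char) (m : Nat) :
    (pvH it flawed memo0 w m).getD 0 false = true := by
  refine pvH_mono it flawed memo0 w 0 0 m (by omega) ?_
  unfold pvH
  simp only [List.range_zero, List.foldl_nil]
  exact pvGetD_set_self _ _ (by simp)

theorem pvH_stable (it : pvItems) (flawed : Bool) (memo0 : pvMemo) (w : List Char)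
    (hk : ∀ p ∈ it, p.1 ≠ ([] : List Char) ∨ p.2 = ([] : List String)) (i : Nat) :
    ∀ m, i + 1 ≤ m → (pvH it flawed memo0 w m).getD i false =
      (pvH it flawed memo0 w (i + 1)).getD i false := by
  intro m
  induction m with
  | zero => intro h; omega
  | succ k ih =>
    intro h
    by_cases hik : i + 1 = k + 1
    · rw [hik]
    · rw [pvH_succ, pvMark1_low it flawed memo0 w hk _ k i (by omega)]
      exact ih (by omega)

-- the reachability closure: a reachable, unmemoised position marks all its successors
theorem pvReach_closure (it : pvItems) (flawed : Bool) (memo0 : pvMemo) (w : List Char)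
    (hk : ∀ p ∈ it, p.1 ≠ ([] : List Char) ∨ p.2 = ([] : List String)) (i : Nat)
    (hi : i < w.length) (hr : (pvReach it flawed memo0 w).getD i false = true)
    (hm : memo0.get? (w.drop i) = none) :
    (∀ tok frags, (tok, frags) ∈ it → PySem.Chars.startswith (w.drop i) tok = true →
        frags ≠ ([] : List String) → (pvReach it flawed memo0 w).getD (i + tok.length) false = true) ∧
    ((∀ p ∈ it, PySem.Chars.startswith (w.drop i) p.1 = false) → flawed = true →
        (pvReach it flawed memo0 w).getD (i + 1) false = true) := by
  rw [pvReach_eq_H] at hr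
  have h1 : (pvH it flawed memo0 w (i + 1)).getD i false = true := by
    rw [← pvH_stable it flawed memo0 w hk i w.length (by omega)]
    exact hr
  have h0 : (pvH it flawed memo0 w i).getD i false = true := by
    rw [pvH_succ, pvMark1_low it flawed memo0 w hk _ i i (by omega)] at h1
    exact h1
  have hstep : pvH it flawed memo0 w (i + 1) =
      (match pvMarkLoop (w.drop i) i it false (pvH it flawed memo0 w i) with
       | (matched, reach') => if !matched && flawed then reach'.set (i + 1) true else reach') := by
    rw [pvH_succ]
    unfold pvMark1
    rw [if_neg (by rw [h0]; simp), if_neg (by rw [hm]; simp)]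
  constructor
  · intro tok frags hmem hsw hf
    have hlen : i + tok.length < (pvH it flawed memo0 w i).length := by
      have := pv_startswith_length hsw
      rw [pvH_len]
      simp only [List.length_drop] at this
      omega
    have hmarked : ((pvMarkLoop (w.drop i) i it false (pvH it flawed memo0 w i)).2).getD
        (i + tok.length) false = true :=
      pvMarkLoop_marks (w.drop i) i tok frags hf hsw it hmem false _ hlen
    have h2 : (pvH it flawed memo0 w (i + 1)).getD (i + tok.length) false = true := by
      rw [hstep]
      cases hml : pvMarkLoop (w.drop i) i it false (pvH it flawed memo0 w i) with
      | mk matched r' =>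
        rw [hml] at hmarked
        show (if (!matched && flawed) = true then r'.set (i + 1) true else r').getD (i + tok.length) false = true
        split
        · exact pvGetD_set_mono _ _ _ hmarked
        · exact hmarked
    rw [pvReach_eq_H]
    exact pvH_mono it flawed memo0 w (i + tok.length) (i + 1) w.length (by omega) h2
  · intro hno hfl
    have h2 : (pvH it flawed memo0 w (i + 1)).getD (i + 1) false = true := by
      rw [hstep, pvMarkLoop_nomatch (w.drop i) i it hno false _]
      simp only [hfl, Bool.not_false, Bool.and_self, if_true]
      exact pvGetD_set_self _ _ (by rw [pvH_len]; omega)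
    rw [pvReach_eq_H]
    exact pvH_mono it flawed memo0 w (i + 1) (i + 1) w.length (by omega) h2

-- ===== pass 2 agrees with the full dp table at reachable positions =====

theorem pvRowLoop_congr (s : List Char) (tl1 tl2 : List (List String)) :
    ∀ (l : pvItems), (∀ tok frags, (tok, frags) ∈ l → PySem.Chars.startswith s tok = true →
        frags ≠ ([] : List String) → tl1.getD (tok.length - 1) [] = tl2.getD (tok.length - 1) []) →
    ∀ (m : Bool) (r : List String), pvRowLoop s tl1 l m r = pvRowLoop s tl2 l m r := by
  intro l
  induction l with
  | nil => intro _ m r; rfl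
  | cons p rest ih =>
    intro hag m r
    obtain ⟨tok, frags⟩ := p
    by_cases hs : PySem.Chars.startswith s tok
    · cases frags with
      | nil =>
        simp only [pvRowLoop, if_pos hs]
        exact ih (fun a b hab => hag a b (List.mem_cons_of_mem _ hab)) true r
      | cons f fs =>
        simp only [pvRowLoop, if_pos hs]
        rw [hag tok (f :: fs) (List.mem_cons_self ..) hs (by simp)]
        split
        · rfl
        · exact ih (fun a b hab => hag a b (List.mem_cons_of_mem _ hab)) true _
    · simp only [pvRowLoop, if_neg hs]
      exact ih (fun a b hab => hag a b (List.mem_cons_of_mem _ hab)) m r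

theorem pvRowLoop_flag_true (s : List Char) (tl : List (List String)) :
    ∀ (l : pvItems) (r : List String), (pvRowLoop s tl l true r).1 = true := by
  intro l
  induction l with
  | nil => intro r; rfl
  | cons p rest ih =>
    intro r
    obtain ⟨tok, frags⟩ := p
    by_cases hs : PySem.Chars.startswith s tok
    · cases frags with
      | nil =>
        simp only [pvRowLoop, if_pos hs]
        exact ih r
      | cons f fs =>
        simp only [pvRowLoop, if_pos hs]
        split
        · rfl
        · exact ih _
    · simp only [pvRowLoop, if_neg hs]
      exact ih r

theorem pvRowLoop_flag_false (s : List Char) (tl : List (List String)) :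
    ∀ (l : pvItems) (m : Bool) (r : List String), (pvRowLoop s tl l m r).1 = false →
      ∀ p ∈ l, PySem.Chars.startswith s p.1 = false := by
  intro l
  induction l with
  | nil => intro m r _ p hp; exact absurd hp (by simp)
  | cons q rest ih =>
    intro m r hflag p hp
    obtain ⟨tok, frags⟩ := q
    by_cases hs : PySem.Chars.startswith s tok
    · exfalso
      cases frags with
      | nil =>
        simp only [pvRowLoop, if_pos hs] at hflag
        rw [pvRowLoop_flag_true] at hflag
        exact absurd hflag (by simp)
      | cons f fs =>
        simp only [pvRowLoop, if_pos hs] at hflag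
        split at hflag
        · exact absurd hflag (by simp)
        · rw [pvRowLoop_flag_true] at hflag
          exact absurd hflag (by simp)
    · rcases List.mem_cons.1 hp with rfl | hp'
      · simpa using hs
      · simp only [pvRowLoop, if_neg hs] at hflag
        exact ih m r hflag p hp'

theorem pvRow_congr (it : pvItems) (flawed : Bool) (s : List Char) (tl1 tl2 : List (List String))
    (hmatch : ∀ tok frags, (tok, frags) ∈ it → PySem.Chars.startswith s tok = true →
      frags ≠ ([] : List String) → tl1.getD (tok.length - 1) [] = tl2.getD (tok.length - 1) [])
    (hfall : (∀ p ∈ it, PySem.Chars.startswith s p.1 = false) → flawed = true →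
      tl1.getD 0 [] = tl2.getD 0 []) :
    pvRow it flawed s tl1 = pvRow it flawed s tl2 := by
  unfold pvRow
  rw [pvRowLoop_congr s tl1 tl2 it hmatch false []]
  cases h : pvRowLoop s tl2 it false [] with
  | mk mt res =>
    by_cases hfb : (!mt && flawed) = true
    · have hmt : mt = false := by
        cases mt
        · rfl
        · simp at hfb
      have hfl : flawed = true := by
        cases flawed
        · simp [hmt] at hfb
        · rfl
      have hno : ∀ p ∈ it, PySem.Chars.startswith s p.1 = false := by
        refine pvRowLoop_flag_false s tl2 it false [] ?_
        rw [h, hmt]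
      rw [hfall hno hfl]
    · simp [hfb]

theorem pvDpR_eq (it : pvItems) (flawed : Bool) (memo0 : pvMemo) (w : List Char)
    (hk : ∀ p ∈ it, p.1 ≠ ([] : List Char) ∨ p.2 = ([] : List String)) :
    ∀ (s : List Char), s.length ≤ w.length → s = w.drop (w.length - s.length) →
    ∀ k, k ≤ s.length →
      (pvReach it flawed memo0 w).getD (w.length - s.length + k) false = true →
      (pvDpR it flawed memo0 (pvReach it flawed memo0 w) w.length s).getD k []
        = (pvDp it flawed memo0 s).getD k [] := by
  intro s
  induction s with
  | nil =>
    intro _ _ k hk0 _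
    have : k = 0 := by simpa using hk0
    subst this
    simp [pvDpR, pvDp]
  | cons c rest ih =>
    intro hsl hs k hkl hrk
    have hrl : rest.length + 1 ≤ w.length := by simpa using hsl
    have hs' : c :: rest = w.drop (w.length - (rest.length + 1)) := by simpa using hs
    have hrest : rest = w.drop (w.length - rest.length) := by
      calc rest = (c :: rest).drop 1 := rfl
        _ = (w.drop (w.length - (rest.length + 1))).drop 1 := by rw [← hs']
        _ = w.drop (w.length - rest.length) := by rw [List.drop_drop]; congr 1; omega
    cases k with
    | succ k' =>
      have h1 : (pvDpR it flawed memo0 (pvReach it flawed memo0 w) w.length (c :: rest)).getD (k' + 1) []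
          = (pvDpR it flawed memo0 (pvReach it flawed memo0 w) w.length rest).getD k' [] := by
        simp [pvDpR]
      have h2 : (pvDp it flawed memo0 (c :: rest)).getD (k' + 1) []
          = (pvDp it flawed memo0 rest).getD k' [] := by
        simp [pvDp]
      rw [h1, h2]
      refine ih (by omega) hrest k' (by simpa using hkl) ?_
      have hrk' : (pvReach it flawed memo0 w).getD (w.length - (rest.length + 1) + (k' + 1)) false = true := by
        simpa using hrk
      rw [show w.length - rest.length + k' = w.length - (rest.length + 1) + (k' + 1) by omega]
      exact hrk'
    | zero =>
      have hr0 : (pvReach it flawed memo0 w).getD (w.length - (rest.length + 1)) false = true := by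
        simpa using hrk
      have hDpR0 : (pvDpR it flawed memo0 (pvReach it flawed memo0 w) w.length (c :: rest)).getD 0 []
          = (if (pvReach it flawed memo0 w).getD (w.length - (rest.length + 1)) false then
               match memo0.get? (c :: rest) with
               | some v => v
               | none => pvRow it flawed (c :: rest)
                   (pvDpR it flawed memo0 (pvReach it flawed memo0 w) w.length rest)
             else []) := by
        simp [pvDpR]
      rw [hDpR0, if_pos hr0]
      have hDp0 : (pvDp it flawed memo0 (c :: rest)).getD 0 []
          = (match memo0.get? (c :: rest) with
             | some v => v
             | none => pvRow it flawed (c :: rest) (pvDp it flawed memo0 rest)) := by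
        simp [pvDp]
      rw [hDp0]
      cases hget : memo0.get? (c :: rest) with
      | some v => rfl
      | none =>
        have hiw : w.length - (rest.length + 1) < w.length := by omega
        have hdropped : w.drop (w.length - (rest.length + 1)) = c :: rest := hs'.symm
        have hclos := pvReach_closure it flawed memo0 w hk (w.length - (rest.length + 1)) hiw hr0
          (by rw [hdropped]; exact hget)
        refine pvRow_congr it flawed (c :: rest) _ _ ?_ ?_
        · intro tok frags hmem hsw hf
          have htok : tok ≠ ([] : List Char) := by
            rcases hk (tok, frags) hmem with h | h
            · exact h
            · exact absurd h hf
          have htl : 1 ≤ tok.length := by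
            cases tok with
            | nil => exact absurd rfl htok
            | cons _ _ => simp
          have htu : tok.length ≤ rest.length + 1 := by
            have := pv_startswith_length hsw
            simpa using this
          have hsucc := hclos.1 tok frags hmem (by rw [hdropped]; exact hsw) hf
          refine ih (by omega) hrest (tok.length - 1) (by omega) ?_
          rw [show w.length - rest.length + (tok.length - 1)
              = w.length - (rest.length + 1) + tok.length by omega]
          exact hsucc
        · intro hno hfl
          have hsucc := hclos.2 (fun p hp => by rw [hdropped]; exact hno p hp) hfl
          refine ih (by omega) hrest 0 (by omega) ?_
          rw [show w.length - rest.length + 0 = w.length - (rest.length + 1) + 1 by omega]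
          exact hsucc

-- the head of pass 2's table at a non-empty, unmemoised word is the canonical value
theorem pvDpR_top (it : pvItems) (flawed : Bool) (memo0 : pvMemo) (c : Char) (rest : List Char)
    (hk : ∀ p ∈ it, p.1 ≠ ([] : List Char) ∨ p.2 = ([] : List String)) :
    (pvDpR it flawed memo0 (pvReach it flawed memo0 (c :: rest)) (rest.length + 1) (c :: rest)).headD []
      = pvV it flawed memo0 (c :: rest) := by
  have hhead : (pvDpR it flawed memo0 (pvReach it flawed memo0 (c :: rest)) (rest.length + 1) (c :: rest)).headD []
      = (pvDpR it flawed memo0 (pvReach it flawed memo0 (c :: rest)) (rest.length + 1) (c :: rest)).getD 0 [] := by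
    simp [pvDpR]
  have hn : (c :: rest).length = rest.length + 1 := by simp
  have h0 : (pvReach it flawed memo0 (c :: rest)).getD ((c :: rest).length - (c :: rest).length + 0) false = true := by
    simp only [Nat.sub_self, Nat.add_zero]
    rw [pvReach_eq_H]
    exact pvH_zero_true ..
  have := pvDpR_eq it flawed memo0 (c :: rest) hk (c :: rest) (by omega) (by simp) 0 (by omega) h0
  rw [hhead, hn] at *
  rw [this]
  rw [pvDp_getD it flawed memo0 (c :: rest) 0 (by omega)]
  rfl

-- ===== VERDICT (by name: the statement is the Claim_ definition above) =====
theorem recursive_decode_py_spec : Claim_equal_recursive_decode_py := by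
  intro word mapping flawed memo _hdom hpre
  unfold Spec_recursive_decode_py recursive_decode_py recursive_decode_py_alt
  rcases hpre with hkeys | hw | hmem
  · have hk : ∀ p ∈ (pvBuildDict mapping).items, p.1 ≠ ([] : List Char) ∨ p.2 = ([] : List String) := by
      refine pvBuildDict_pred _ mapping PySem.Dict.empty (by simp [PySem.Dict.empty]) ?_
      intro q hq
      rcases hkeys q hq with h | h
      · left
        intro hnil
        apply h
        have := congrArg String.ofList hnil
        simpa using this
      · exact Or.inr (by simp [h])
    have hmain := pvDecodeA_V (pvBuildDict mapping) flawed (pvBuildMemo memo) hk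
      (word.toList.length + 1) word.toList (pvBuildMemo memo) (by omega)
      (pvInv_init _ flawed (pvBuildMemo memo))
    rw [hmain.1]
    cases hl : word.toList with
    | nil => simp [pvV, pvDp]
    | cons c rest =>
      cases hget : (pvBuildMemo memo).get? (c :: rest) with
      | some v => simp [pvV, pvDp, hget]
      | none =>
        simp only [hget]
        rw [pvDpR_top (pvBuildDict mapping).items flawed (pvBuildMemo memo) c rest hk]
  · have hl : word.toList = [] := by
      rw [hw]; rfl
    simp [pvDecodeA, hl]
  · cases memo with
    | none => exact absurd hmem (by simp)
    | some l =>
      have hv : ((pvBuildDict l).get? word.toList).isSome :=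
        pvBuildMemo_mem word l PySem.Dict.empty (by simpa using hmem)
      obtain ⟨v, hv⟩ := Option.isSome_iff_exists.1 hv
      cases hl : word.toList with
      | nil => simp [pvDecodeA]
      | cons c rest =>
        rw [hl] at hv
        simp [pvDecodeA, pvBuildMemo, hv]
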